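-- pv_equiv track=rewrite | github.com/Wisienkas/wg_exporter | wg_exporter/metrics.py | split_lines_by_key
-- ===== SOURCE A (Python) =====
-- def split_lines_by_key(split_key, lines):
--     indexes = []
--     for index, line in enumerate(lines):
--         if split_key in line:
--             indexes.append(index)
--
--     interface_parts = []
--     for index, start in enumerate(indexes):
--         if index == len(indexes) - 1:
--             interface_parts.append(lines[start:])
--         else:
--             interface_parts.append(lines[start:indexes[index + 1]])
--
--     return interface_parts
-- ===== SOURCE B (Python) =====
-- def split_lines_by_key(split_key, lines):
--     parts = []
--     current = None
--     for line in lines: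
--         if split_key in line:
--             current = [line]
--             parts.append(current)
--         elif current is not None:
--             current.append(line)
--     return parts
-- ===== Notes on version B (the rewrite author's own statement) =====
-- stated objective: simpler
-- what changed: Single pass that opens a fresh chunk at each key line and appends following lines to it, instead of first collecting an index table and then slicing between adjacent indexes.
import Mathlib
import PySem

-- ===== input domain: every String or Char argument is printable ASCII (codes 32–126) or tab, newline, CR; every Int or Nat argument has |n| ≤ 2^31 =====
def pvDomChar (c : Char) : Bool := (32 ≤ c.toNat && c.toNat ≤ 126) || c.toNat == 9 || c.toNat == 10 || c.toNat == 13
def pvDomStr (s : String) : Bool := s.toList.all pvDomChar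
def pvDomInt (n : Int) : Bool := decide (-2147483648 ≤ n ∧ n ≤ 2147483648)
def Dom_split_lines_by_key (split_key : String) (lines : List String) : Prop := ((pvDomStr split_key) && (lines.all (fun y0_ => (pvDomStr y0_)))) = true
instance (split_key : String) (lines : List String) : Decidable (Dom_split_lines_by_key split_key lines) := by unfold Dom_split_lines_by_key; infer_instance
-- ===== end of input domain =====

-- B does the same splitting in one pass (a fresh chunk is opened at each key line) instead of
-- collecting an index table and slicing between adjacent indexes; return values agree everywhere.

-- ===== PORT A =====
def split_lines_by_key (split_key : String) (lines : List String) : List (List String) :=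
  -- indexes = [index for index, line in enumerate(lines) if split_key in line]
  let indexes : List Int :=
    (PySem.List.enumerate lines 0).foldl
      (fun acc p => if PySem.Str.isIn split_key p.2 then acc ++ [p.1] else acc) []
  -- second loop: slice between adjacent indexes (lines[start:] for the last one)
  (PySem.List.enumerate indexes 0).foldl
    (fun acc p =>
      if p.1 == (indexes.length : Int) - 1 then
        acc ++ [PySem.List.slice lines (some p.2) none]
      else
        -- indexes[index + 1] always exists here; pyGet? returns it as `some _`
        acc ++ [PySem.List.slice lines (some p.2) (PySem.List.pyGet? indexes (p.1 + 1))])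
    []

-- ===== PORT B =====
-- state = the chunks built so far, reversed, each chunk reversed; the head is `current`
-- (empty state = `current is None`, which in B holds exactly until the first key line).
def split_lines_by_key_alt (split_key : String) (lines : List String) : List (List String) :=
  let st :=
    lines.foldl
      (fun (st : List (List String)) line =>
        if PySem.Str.isIn split_key line then [line] :: st
        else
          match st with
          | [] => []
          | c :: rest => (line :: c) :: rest)
      []
  (st.map List.reverse).reverse

-- ===== PRECONDITION & SPEC =====
def Spec_split_lines_by_key (split_key : String) (lines : List String) (out : List (List String)) : Prop := out = split_lines_by_key_alt split_key lines
instance (split_key : String) (lines : List String) (out : List (List String)) : Decidable (Spec_split_lines_by_key split_key lines out) := by unfold Spec_split_lines_by_key; infer_instance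

-- ===== CLAIM (what is proved, stated in full; the proofs are below) =====
def Claim_equal_split_lines_by_key : Prop := ∀ (split_key : String) (lines : List String), Dom_split_lines_by_key split_key lines → Spec_split_lines_by_key split_key lines (split_lines_by_key split_key lines)

-- ===== LEMMAS AND PROOFS =====

-- Common reference shape: the chunk starting at each p-line, holding the following non-p lines.
def chunks (p : String → Bool) : List String → List (List String)
  | [] => []
  | x :: xs =>
    if p x then
      (x :: xs.takeWhile (fun y => !p y)) :: chunks p (xs.dropWhile (fun y => !p y))
    else chunks p xs
termination_by l => l.length
decreasing_by
  · exact Nat.lt_succ_of_le (List.length_dropWhile_le _ _)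
  · simp

lemma chunks_nil (p : String → Bool) : chunks p [] = [] := by rw [chunks.eq_def]

lemma chunks_cons (p : String → Bool) (x : String) (xs : List String) :
    chunks p (x :: xs) =
      if p x then (x :: xs.takeWhile (fun y => !p y)) :: chunks p (xs.dropWhile (fun y => !p y))
      else chunks p xs := by
  rw [chunks.eq_def]

-- A's first loop, recursively.
def idxs (p : String → Bool) : Int → List String → List Int
  | _, [] => []
  | n, x :: xs => if p x then n :: idxs p (n + 1) xs else idxs p (n + 1) xs

-- A's second loop, recursively over the index list.
def phase2 (ls : List String) : List Int → List (List String)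
  | [] => []
  | [a] => [PySem.List.slice ls (some a) none]
  | a :: b :: r => PySem.List.slice ls (some a) (some b) :: phase2 ls (b :: r)

lemma idxs_eq (p : String → Bool) (ls : List String) : ∀ s : Int,
    (((PySem.List.enumerate ls s).filter (fun q => p q.2)).map (·.1)) = idxs p s ls := by
  induction ls with
  | nil => intro s; simp [PySem.List.enumerate_nil, idxs]
  | cons x xs ih =>
    intro s
    simp only [PySem.List.enumerate_cons, List.filter_cons, idxs]
    by_cases h : p x <;> simp [h, ih (s + 1)]

lemma idxs_nonneg (p : String → Bool) (ls : List String) : ∀ s j : Int,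
    j ∈ idxs p s ls → s ≤ j := by
  induction ls with
  | nil => intro s j h; simp [idxs] at h
  | cons x xs ih =>
    intro s j h
    simp only [idxs] at h
    by_cases hp : p x <;> simp [hp] at h
    · rcases h with h | h
      · omega
      · have := ih (s + 1) j h; omega
    · have := ih (s + 1) j h; omega

lemma idxs_shift (p : String → Bool) (ls : List String) : ∀ s : Int,
    idxs p (s + 1) ls = (idxs p s ls).map (· + 1) := by
  induction ls with
  | nil => intro s; simp [idxs]
  | cons x xs ih =>
    intro s
    by_cases hp : p x <;> simp [idxs, hp, ih (s + 1), ih s]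

lemma idxs_cons_pos (p : String → Bool) (x : String) (xs : List String) (hp : p x = true) :
    idxs p 0 (x :: xs) = 0 :: (idxs p 0 xs).map (· + 1) := by
  have h1 : idxs p 0 (x :: xs) = 0 :: idxs p 1 xs := by simp [idxs, hp]
  rw [h1, show idxs p 1 xs = (idxs p 0 xs).map (· + 1) from by simpa using idxs_shift p xs 0]

lemma idxs_cons_neg (p : String → Bool) (x : String) (xs : List String) (hp : p x = false) :
    idxs p 0 (x :: xs) = (idxs p 0 xs).map (· + 1) := by
  have h1 : idxs p 0 (x :: xs) = idxs p 1 xs := by simp [idxs, hp]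
  rw [h1, show idxs p 1 xs = (idxs p 0 xs).map (· + 1) from by simpa using idxs_shift p xs 0]

lemma idxs_nil_iff (p : String → Bool) (ls : List String) : ∀ s : Int,
    (idxs p s ls = [] ↔ ∀ y ∈ ls, p y = false) := by
  induction ls with
  | nil => intro s; simp [idxs]
  | cons x xs ih =>
    intro s
    by_cases hp : p x <;> simp [idxs, hp, ih (s + 1)]

-- the first collected index marks the end of the leading run of non-key lines
lemma idxs_take (p : String → Bool) (xs : List String) : ∀ j r,
    idxs p 0 xs = j :: r → xs.take j.toNat = xs.takeWhile (fun y => !p y) := by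
  induction xs with
  | nil => intro j r h; simp [idxs] at h
  | cons x t ih =>
    intro j r h
    by_cases hp : p x
    · rw [idxs_cons_pos p x t hp] at h
      obtain ⟨hj, -⟩ := List.cons_eq_cons.mp h
      simp [← hj, hp]
    · rw [idxs_cons_neg p x t (by simp [hp])] at h
      rcases hj : idxs p 0 t with _ | ⟨j', r'⟩
      · simp [hj] at h
      · rw [hj] at h
        simp only [List.map_cons] at h
        obtain ⟨h1, -⟩ := List.cons_eq_cons.mp h
        have hj'0 : (0 : Int) ≤ j' := idxs_nonneg p t 0 j' (by simp [hj])
        have ht : (j' + 1).toNat = j'.toNat + 1 := by omega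
        rw [← h1, ht, List.take_succ_cons, List.takeWhile_cons]
        simp only [hp, Bool.not_false, if_true]
        rw [ih j' r' hj]

lemma slice_shift (x : String) (ls : List String) (a b : Int) (ha : 0 ≤ a) (hb : 0 ≤ b) :
    PySem.List.slice (x :: ls) (some (a + 1)) (some (b + 1)) = PySem.List.slice ls (some a) (some b) := by
  rw [PySem.List.slice_toNat _ (by omega) (by omega), PySem.List.slice_toNat _ ha hb]
  have h1 : (a + 1).toNat = a.toNat + 1 := by omega
  have h2 : (b + 1).toNat = b.toNat + 1 := by omega
  simp [h1, h2]

lemma slice_from_shift (x : String) (ls : List String) (a : Int) (ha : 0 ≤ a) :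
    PySem.List.slice (x :: ls) (some (a + 1)) none = PySem.List.slice ls (some a) none := by
  rw [PySem.List.slice_from _ (by omega), PySem.List.slice_from _ ha]
  have h1 : (a + 1).toNat = a.toNat + 1 := by omega
  simp [h1]

lemma phase2_shift (x : String) (ls : List String) : ∀ js : List Int,
    (∀ j ∈ js, 0 ≤ j) → phase2 (x :: ls) (js.map (· + 1)) = phase2 ls js := by
  intro js
  induction js with
  | nil => intro _; simp [phase2]
  | cons a t ih =>
    intro hnn
    cases t with
    | nil =>
      simp only [List.map, phase2]
      rw [slice_from_shift x ls a (hnn a (by simp))]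
    | cons b r =>
      simp only [List.map, phase2]
      rw [slice_shift x ls a b (hnn a (by simp)) (hnn b (by simp))]
      have := ih (fun j hj => hnn j (List.mem_cons_of_mem _ hj))
      simp only [List.map] at this
      rw [this]

lemma chunks_dropWhile (p : String → Bool) (ls : List String) :
    chunks p (ls.dropWhile (fun y => !p y)) = chunks p ls := by
  induction ls with
  | nil => simp
  | cons x xs ih =>
    by_cases hp : p x
    · simp [hp]
    · rw [List.dropWhile_cons]
      simp only [hp, Bool.not_false, if_true]
      rw [ih, chunks_cons, if_neg (by simp [hp])]

lemma phase2_idxs_eq_chunks (p : String → Bool) (ls : List String) :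
    phase2 ls (idxs p 0 ls) = chunks p ls := by
  induction ls with
  | nil => simp [idxs, phase2, chunks_nil]
  | cons x xs ih =>
    by_cases hp : p x
    · rw [idxs_cons_pos p x xs hp]
      have hnn : ∀ i ∈ idxs p 0 xs, (0 : Int) ≤ i := fun i hi => idxs_nonneg p xs 0 i hi
      rcases hj : idxs p 0 xs with _ | ⟨j, r⟩
      · simp only [List.map_nil, phase2]
        rw [PySem.List.slice_zero_start, PySem.List.slice_none_none]
        have hall : ∀ y ∈ xs, p y = false := (idxs_nil_iff p xs 0).mp hj
        rw [chunks_cons, if_pos hp]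
        have htw : xs.takeWhile (fun y => !p y) = xs :=
          List.takeWhile_eq_self_iff.mpr (by intro a ha; simp [hall a ha])
        have hdw : xs.dropWhile (fun y => !p y) = [] :=
          List.dropWhile_eq_nil_iff.mpr (by intro a ha; simp [hall a ha])
        simp [htw, hdw, chunks_nil]
      · have hj0 : (0 : Int) ≤ j := hnn j (by simp [hj])
        simp only [List.map_cons, phase2]
        rw [PySem.List.slice_zero_start, PySem.List.slice_to _ (by omega)]
        have h1 : (j + 1).toNat = j.toNat + 1 := by omega
        have hshift : phase2 (x :: xs) ((j + 1) :: r.map (· + 1)) = phase2 xs (j :: r) := by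
          have := phase2_shift x xs (j :: r) (by intro i hi; exact hnn i (by rw [hj]; exact hi))
          simpa using this
        rw [hshift, ← hj, ih, h1, List.take_succ_cons, idxs_take p xs j r hj]
        rw [chunks_cons, if_pos hp, chunks_dropWhile]
    · rw [idxs_cons_neg p x xs (by simp [hp])]
      rw [phase2_shift x xs _ (fun j hj => idxs_nonneg p xs 0 j hj), ih]
      rw [chunks_cons, if_neg (by simp [hp])]

-- A's second loop over enumerate(indexes) equals phase2 of the index list.
lemma enum_fold_eq_phase2 (ls : List String) (js : List Int) :
    (PySem.List.enumerate js).foldl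
      (fun acc p =>
        if p.1 == (js.length : Int) - 1 then
          acc ++ [PySem.List.slice ls (some p.2) none]
        else
          acc ++ [PySem.List.slice ls (some p.2) (PySem.List.pyGet? js (p.1 + 1))])
      [] = phase2 ls js := by
  have key : ∀ (suf pre : List Int), js = pre ++ suf →
      (PySem.List.enumerate suf (pre.length : Int)).map
        (fun p =>
          if p.1 == (js.length : Int) - 1 then
            PySem.List.slice ls (some p.2) none
          else
            PySem.List.slice ls (some p.2) (PySem.List.pyGet? js (p.1 + 1))) = phase2 ls suf := by
    intro suf
    induction suf with
    | nil => intro pre _; simp [PySem.List.enumerate_nil, phase2]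
    | cons a t ih =>
      intro pre hpre
      cases t with
      | nil =>
        have hlen : js.length = pre.length + 1 := by rw [hpre]; simp
        have hc : (((pre.length : Int)) == (js.length : Int) - 1) = true := by
          rw [hlen]; push_cast; simp
        simp only [PySem.List.enumerate_cons, PySem.List.enumerate_nil, List.map_cons, List.map_nil,
          hc, if_true, phase2]
      | cons b r =>
        have hlen : js.length = pre.length + (r.length + 2) := by
          rw [hpre]; simp only [List.length_append, List.length_cons]; try omega
        have hne : ((pre.length : Int) == (js.length : Int) - 1) = false := by
          simp only [beq_eq_false_iff_ne, ne_eq, hlen]; push_cast; omega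
        have hget : PySem.List.pyGet? js ((pre.length : Int) + 1) = some b := by
          rw [show ((pre.length : Int) + 1) = ((pre.length + 1 : Nat) : Int) by push_cast; ring,
            PySem.List.pyGet?_natCast, hpre]
          rw [List.getElem?_append_right (by simp)]
          simp
        have ihs := ih (pre ++ [a]) (by simp [hpre])
        simp only [List.length_append, List.length_singleton, Nat.cast_add, Nat.cast_one] at ihs
        rw [PySem.List.enumerate_cons, List.map_cons, ihs, hne]
        simp only [Bool.false_eq_true, if_false, hget]
        simp [phase2]
  have hbody : (fun (acc : List (List String)) (p : Int × Int) =>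
      if p.1 == (js.length : Int) - 1 then acc ++ [PySem.List.slice ls (some p.2) none]
      else acc ++ [PySem.List.slice ls (some p.2) (PySem.List.pyGet? js (p.1 + 1))])
      = fun acc p => acc ++ [if p.1 == (js.length : Int) - 1 then PySem.List.slice ls (some p.2) none
          else PySem.List.slice ls (some p.2) (PySem.List.pyGet? js (p.1 + 1))] := by
    funext acc p; split <;> rfl
  rw [hbody, PySem.List.foldl_append_singleton_eq_map]
  have := key js [] (by simp)
  simpa using this

-- B's loop state, finished: reversed list of reversed chunks (head = current chunk).
def bfin (st : List (List String)) : List (List String) := (st.map List.reverse).reverse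

def bstep (p : String → Bool) (st : List (List String)) (line : String) : List (List String) :=
  if p line then [line] :: st
  else match st with
    | [] => []
    | c :: rest => (line :: c) :: rest

lemma bfold_open (p : String → Bool) (ls : List String) : ∀ (c : List String) (rest : List (List String)),
    bfin (ls.foldl (bstep p) (c :: rest)) =
      bfin rest ++ [c.reverse ++ ls.takeWhile (fun y => !p y)] ++ chunks p (ls.dropWhile (fun y => !p y)) := by
  induction ls with
  | nil => intro c rest; simp [bfin, chunks_nil]
  | cons x xs ih =>
    intro c rest
    by_cases hp : p x
    · simp only [List.foldl_cons, bstep, hp, if_true]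
      rw [ih [x] (c :: rest), List.takeWhile_cons, List.dropWhile_cons]
      simp only [hp, Bool.not_true, Bool.false_eq_true, if_false]
      rw [chunks_cons, if_pos hp]
      simp [bfin]
    · simp only [List.foldl_cons, bstep, hp, Bool.false_eq_true, if_false]
      rw [ih (x :: c) rest]
      rw [List.takeWhile_cons, List.dropWhile_cons]
      simp [hp]

lemma bfold_closed (p : String → Bool) (ls : List String) :
    bfin (ls.foldl (bstep p) []) = chunks p ls := by
  induction ls with
  | nil => simp [bfin, chunks_nil]
  | cons x xs ih =>
    by_cases hp : p x
    · simp only [List.foldl_cons, bstep, hp, if_true]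
      rw [bfold_open p xs [x] []]
      rw [chunks_cons, if_pos hp]
      simp [bfin]
    · simp only [List.foldl_cons, bstep, hp, Bool.false_eq_true, if_false]
      rw [ih, chunks_cons, if_neg (by simp [hp])]

-- ===== VERDICT (by name: the statement is the Claim_ definition above) =====
theorem split_lines_by_key_spec : Claim_equal_split_lines_by_key := by
  intro key lines _
  unfold Spec_split_lines_by_key
  show split_lines_by_key key lines = split_lines_by_key_alt key lines
  simp only [split_lines_by_key, split_lines_by_key_alt]
  rw [PySem.List.foldl_append_if]
  simp only [List.nil_append]
  rw [idxs_eq (fun y => PySem.Str.isIn key y) lines 0]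
  rw [enum_fold_eq_phase2 lines (idxs (fun y => PySem.Str.isIn key y) 0 lines)]
  rw [phase2_idxs_eq_chunks]
  show chunks (fun y => PySem.Str.isIn key y) lines =
    bfin (List.foldl (bstep (fun y => PySem.Str.isIn key y)) [] lines)
  exact (bfold_closed _ lines).symm
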